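-- pv_equiv track=rewrite | github.com/SeuTao/FaceBagNet | process/data.py | get_sample_dict
-- ===== SOURCE A (Python) =====
-- def get_sample_dict(label_dict, external_label_dict, image_list):
--     sample_dict = {}
--     for i in range(28):
--         sample_dict[i] = []
--
--     for name in image_list:
--         if name in label_dict:
--             y = label_dict[name]
--         else:
--             y = external_label_dict[name]
--
--         for i in range(28):
--             if y[i] == 1:
--                 sample_dict[i].append(name)
--
--     c = 0
--     for item in sample_dict:
--         c += len(sample_dict[item])
--
--     return sample_dict, c
-- ===== SOURCE B (Python) =====
-- def get_sample_dict(label_dict, external_label_dict, image_list):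
--     def get_label(name):
--         return label_dict[name] if name in label_dict else external_label_dict[name]
--
--     sample_dict = {}
--     for i in range(28):
--         sample_dict[i] = [name for name in image_list if get_label(name)[i] == 1]
--
--     c = sum(len(v) for v in sample_dict.values())
--     return sample_dict, c
-- ===== Notes on version B (the rewrite author's own statement) =====
-- stated objective: alternative
-- what changed: Traversal transposed to label-major: each of the 28 buckets is built directly as one filter comprehension over image_list, and the count is a sum of bucket lengths, replacing A's name-major nested appends into a pre-initialised dict and its separate counting loop.
import Mathlib
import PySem

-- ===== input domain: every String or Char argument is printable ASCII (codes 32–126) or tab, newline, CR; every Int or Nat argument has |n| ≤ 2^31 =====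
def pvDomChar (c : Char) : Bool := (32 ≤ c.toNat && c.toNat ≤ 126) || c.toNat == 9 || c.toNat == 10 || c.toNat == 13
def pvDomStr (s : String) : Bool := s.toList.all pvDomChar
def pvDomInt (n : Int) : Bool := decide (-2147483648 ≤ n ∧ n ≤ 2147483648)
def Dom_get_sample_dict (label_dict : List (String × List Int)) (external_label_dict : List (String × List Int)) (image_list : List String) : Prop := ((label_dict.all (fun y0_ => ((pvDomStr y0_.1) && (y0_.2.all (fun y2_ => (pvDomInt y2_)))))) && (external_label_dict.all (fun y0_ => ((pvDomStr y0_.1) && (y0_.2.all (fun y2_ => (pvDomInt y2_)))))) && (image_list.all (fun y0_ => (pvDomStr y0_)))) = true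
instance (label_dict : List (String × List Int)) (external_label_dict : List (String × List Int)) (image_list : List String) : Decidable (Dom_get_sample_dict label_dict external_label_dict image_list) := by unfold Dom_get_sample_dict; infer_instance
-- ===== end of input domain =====

-- B rebuilds the result label-major (each bucket as one filter over image_list, count as a sum of
-- bucket lengths) instead of A's name-major append loop; same outputs, no speed claim.

-- ===== PORT A =====
def get_sample_dict (label_dict : List (String × List Int)) (external_label_dict : List (String × List Int)) (image_list : List String) : (List (Int × List String)) × Int :=
  -- sample_dict = {}; for i in range(28): sample_dict[i] = []
  let sd0 : PySem.Dict Int (List String) :=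
    (PySem.List.pyRange 0 28 1).foldl (fun d i => d.insert i ([] : List String)) PySem.Dict.empty
  -- for name in image_list: y = label_dict[name] / external_label_dict[name]; for i in range(28): if y[i]==1: append
  let sd : PySem.Dict Int (List String) :=
    image_list.foldl (fun d name =>
      let y : List Int :=
        if (PySem.Dict.mk label_dict).contains name
        then (PySem.Dict.mk label_dict).getD name []
        else (PySem.Dict.mk external_label_dict).getD name []
      (PySem.List.pyRange 0 28 1).foldl (fun d2 i =>
        if PySem.List.pyGet? y i = some 1 then d2.modify i [] (· ++ [name]) else d2) d) sd0
  -- c = 0; for item in sample_dict: c += len(sample_dict[item])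
  let c : Int := sd.keys.foldl (fun c item => c + ((sd.getD item []).length : Int)) 0
  (sd.items, c)

-- ===== PORT B =====
-- get_label(name) = label_dict[name] if name in label_dict else external_label_dict[name]
def pvGetLabel (label_dict : List (String × List Int)) (external_label_dict : List (String × List Int)) (name : String) : List Int :=
  match (PySem.Dict.mk label_dict).get? name with
  | some y => y
  | none => (PySem.Dict.mk external_label_dict).getD name []

def get_sample_dict_alt (label_dict : List (String × List Int)) (external_label_dict : List (String × List Int)) (image_list : List String) : (List (Int × List String)) × Int :=
  -- for i in range(28): sample_dict[i] = [name for name in image_list if get_label(name)[i] == 1]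
  let sd : PySem.Dict Int (List String) :=
    (PySem.List.pyRange 0 28 1).foldl (fun d i =>
      d.insert i (image_list.filter (fun name =>
        decide (PySem.List.pyGet? (pvGetLabel label_dict external_label_dict name) i = some 1)))) PySem.Dict.empty
  -- c = sum(len(v) for v in sample_dict.values())
  let c : Int := (sd.values.map (fun v => (v.length : Int))).sum
  (sd.items, c)

-- ===== PRECONDITION & SPEC =====
-- Pre_ excludes exactly the inputs on which the Python A raises: a name of image_list missing from
-- both dicts (KeyError) or whose label list is shorter than 28 (IndexError).
def Pre_get_sample_dict (label_dict : List (String × List Int)) (external_label_dict : List (String × List Int)) (image_list : List String) : Prop :=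
  ∀ name ∈ image_list,
    (((PySem.Dict.mk label_dict).contains name || (PySem.Dict.mk external_label_dict).contains name) = true) ∧
    28 ≤ (if (PySem.Dict.mk label_dict).contains name
          then (PySem.Dict.mk label_dict).getD name []
          else (PySem.Dict.mk external_label_dict).getD name []).length
instance (label_dict : List (String × List Int)) (external_label_dict : List (String × List Int)) (image_list : List String) : Decidable (Pre_get_sample_dict label_dict external_label_dict image_list) := by unfold Pre_get_sample_dict; infer_instance

def pvWitness_get_sample_dict : (List (String × List Int)) × (List (String × List Int)) × List String :=
  ([("a", List.replicate 28 (1 : Int))], [("b", List.replicate 28 (0 : Int))], ["a", "b", "a"])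

def Spec_get_sample_dict (label_dict : List (String × List Int)) (external_label_dict : List (String × List Int)) (image_list : List String) (out : (List (Int × List String)) × Int) : Prop := out = get_sample_dict_alt label_dict external_label_dict image_list
instance (label_dict : List (String × List Int)) (external_label_dict : List (String × List Int)) (image_list : List String) (out : (List (Int × List String)) × Int) : Decidable (Spec_get_sample_dict label_dict external_label_dict image_list out) := by unfold Spec_get_sample_dict; infer_instance

-- ===== CLAIM (what is proved, stated in full; the proofs are below) =====
def Claim_equal_get_sample_dict : Prop := ∀ (label_dict : List (String × List Int)) (external_label_dict : List (String × List Int)) (image_list : List String), Dom_get_sample_dict label_dict external_label_dict image_list → Pre_get_sample_dict label_dict external_label_dict image_list → Spec_get_sample_dict label_dict external_label_dict image_list (get_sample_dict label_dict external_label_dict image_list)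

-- ===== LEMMAS AND PROOFS =====

-- a dict whose items are l.map (fun i => (i, f i)) — the common shape of both builds
def pvMkM (l : List Int) (f : Int → List String) : PySem.Dict Int (List String) :=
  PySem.Dict.mk (l.map (fun i => (i, f i)))

theorem pvMkM_congr {l : List Int} {f g : Int → List String}
    (h : ∀ i ∈ l, f i = g i) : pvMkM l f = pvMkM l g := by
  unfold pvMkM
  exact congrArg PySem.Dict.mk (List.map_congr_left (fun i hi => by rw [h i hi]))

theorem contains_pvMkM (l : List Int) (f : Int → List String) (k : Int) :
    (pvMkM l f).contains k = decide (k ∈ l) := by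
  induction l with
  | nil => simp [pvMkM, PySem.Dict.contains]
  | cons a t ih =>
    simp only [pvMkM, PySem.Dict.contains] at ih ⊢
    simp only [List.map_cons, List.any_cons, List.mem_cons, ih]
    rcases eq_or_ne a k with h | h
    · simp [h]
    · simp [h, Ne.symm h]

theorem getD_pvMkM (l : List Int) (f : Int → List String) (k : Int) (dflt : List String)
    (hk : k ∈ l) : (pvMkM l f).getD k dflt = f k := by
  induction l with
  | nil => simp at hk
  | cons a t ih =>
    rcases List.mem_cons.mp hk with h | h
    · subst h; simp [pvMkM, PySem.Dict.getD, PySem.Dict.get?]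
    · by_cases ha : a = k
      · subst ha; simp [pvMkM, PySem.Dict.getD, PySem.Dict.get?]
      · have := ih h
        simp only [pvMkM, PySem.Dict.getD, PySem.Dict.get?] at this ⊢
        simpa [List.find?_cons, ha] using this

theorem insert_pvMkM (l : List Int) (f : Int → List String) (k : Int) (v : List String)
    (hk : k ∈ l) : (pvMkM l f).insert k v = pvMkM l (fun i => if i = k then v else f i) := by
  unfold PySem.Dict.insert
  rw [contains_pvMkM]
  simp only [hk, decide_true, if_true]
  unfold pvMkM
  congr 1
  rw [List.map_map]
  exact List.map_congr_left (fun i _ => by by_cases h : i = k <;> simp [h])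

theorem modify_pvMkM (l : List Int) (f : Int → List String) (k : Int) (dflt : List String)
    (g : List String → List String) (hk : k ∈ l) :
    (pvMkM l f).modify k dflt g = pvMkM l (fun i => if i = k then g (f i) else f i) := by
  unfold PySem.Dict.modify
  rw [getD_pvMkM l f k dflt hk, insert_pvMkM l f k (g (f k)) hk]
  exact pvMkM_congr (fun i _ => by by_cases h : i = k <;> simp [h])

-- the inner 'for i in range(28)' pass of A, over a dict of shape pvMkM
theorem innerFold_pvMkM (l : List Int) (P : Int → Prop) [DecidablePred P]
    (g : List String → List String) (dflt : List String) :
    ∀ (ks : List Int) (f : Int → List String), ks.Nodup → (∀ k ∈ ks, k ∈ l) →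
    ks.foldl (fun d k => if P k then d.modify k dflt g else d) (pvMkM l f)
      = pvMkM l (fun i => if i ∈ ks ∧ P i then g (f i) else f i) := by
  intro ks
  induction ks with
  | nil => intro f _ _; simp
  | cons a t ih =>
    intro f hnd hsub
    have ha : a ∈ l := hsub a (List.mem_cons_self ..)
    have hnd' : t.Nodup := (List.nodup_cons.mp hnd).2
    have hat : a ∉ t := (List.nodup_cons.mp hnd).1
    simp only [List.foldl_cons]
    by_cases hP : P a
    · rw [if_pos hP, modify_pvMkM l f a dflt g ha,
        ih _ hnd' (fun k hk => hsub k (List.mem_cons_of_mem _ hk))]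
      refine pvMkM_congr (fun i _ => ?_)
      by_cases hi : i = a
      · subst hi
        simp [hat, hP]
      · by_cases hit : i ∈ t <;> by_cases hPi : P i <;> simp [hi, hit, hPi]
    · rw [if_neg hP, ih _ hnd' (fun k hk => hsub k (List.mem_cons_of_mem _ hk))]
      refine pvMkM_congr (fun i _ => ?_)
      by_cases hi : i = a
      · subst hi; simp [hP]
      · by_cases hit : i ∈ t <;> by_cases hPi : P i <;> simp [hi, hit, hPi]

-- the outer 'for name in image_list' loop of A, with an abstract label function
theorem outerFold_pvMkM (lab : String → List Int) :
    ∀ (il : List String) (f : Int → List String),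
    il.foldl (fun d name =>
        (PySem.List.pyRange 0 28 1).foldl (fun d2 i =>
          if PySem.List.pyGet? (lab name) i = some 1 then d2.modify i [] (· ++ [name]) else d2) d)
      (pvMkM (PySem.List.pyRange 0 28 1) f)
      = pvMkM (PySem.List.pyRange 0 28 1)
          (fun i => f i ++ il.filter (fun n => decide (PySem.List.pyGet? (lab n) i = some 1))) := by
  intro il
  induction il with
  | nil =>
    intro f
    simp only [List.foldl_nil]
    exact (pvMkM_congr (fun i _ => by simp)).symm
  | cons name t ih =>
    intro f
    simp only [List.foldl_cons]
    rw [innerFold_pvMkM (PySem.List.pyRange 0 28 1)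
        (fun i => PySem.List.pyGet? (lab name) i = some 1) (· ++ [name]) []
        (PySem.List.pyRange 0 28 1) f (PySem.List.nodup_pyRange_one 0 28) (fun k hk => hk),
      ih]
    refine pvMkM_congr (fun i hi => ?_)
    by_cases hc : PySem.List.pyGet? (lab name) i = some 1
    · simp [hi, hc]
    · simp [hc]

-- A's initial dict {0: [], …, 27: []}
theorem init_dict_eq :
    (PySem.List.pyRange 0 28 1).foldl (fun d i => d.insert i ([] : List String)) PySem.Dict.empty
      = pvMkM (PySem.List.pyRange 0 28 1) (fun _ => []) := by
  apply PySem.Dict.ext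
  have h := PySem.Dict.items_foldl_insert_fresh (PySem.List.pyRange 0 28 1) (fun i => i)
    (fun _ => ([] : List String)) PySem.Dict.empty (fun a _ => PySem.Dict.contains_empty a)
    (by simpa using PySem.List.nodup_pyRange_one 0 28)
  simpa [pvMkM, PySem.Dict.empty] using h

-- B's dict, built by inserting each fresh bucket
theorem alt_dict_eq (v : Int → List String) :
    (PySem.List.pyRange 0 28 1).foldl (fun d i => d.insert i (v i)) PySem.Dict.empty
      = pvMkM (PySem.List.pyRange 0 28 1) v := by
  apply PySem.Dict.ext
  have h := PySem.Dict.items_foldl_insert_fresh (PySem.List.pyRange 0 28 1) (fun i => i)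
    v PySem.Dict.empty (fun a _ => PySem.Dict.contains_empty a)
    (by simpa using PySem.List.nodup_pyRange_one 0 28)
  simpa [pvMkM, PySem.Dict.empty] using h

theorem keys_pvMkM (l : List Int) (f : Int → List String) : (pvMkM l f).keys = l := by
  simp [pvMkM, PySem.Dict.keys, Function.comp_def]

theorem values_pvMkM (l : List Int) (f : Int → List String) : (pvMkM l f).values = l.map f := by
  simp [pvMkM, PySem.Dict.values, Function.comp_def]

-- A's lookup expression equals B's get_label helper
theorem lab_eq (label_dict external_label_dict : List (String × List Int)) (name : String) :
    (if (PySem.Dict.mk label_dict).contains name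
     then (PySem.Dict.mk label_dict).getD name []
     else (PySem.Dict.mk external_label_dict).getD name [])
      = pvGetLabel label_dict external_label_dict name := by
  unfold pvGetLabel
  rw [PySem.Dict.contains_eq_isSome_get?]
  cases h : (PySem.Dict.mk label_dict).get? name <;>
    simp [h, PySem.Dict.getD]

-- ===== VERDICT (by name: the statement is the Claim_ definition above) =====
theorem get_sample_dict_spec : Claim_equal_get_sample_dict := by
  intro label_dict external_label_dict image_list _ _
  unfold Spec_get_sample_dict get_sample_dict get_sample_dict_alt
  have hlab : ∀ name : String,
      (if (PySem.Dict.mk label_dict).contains name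
       then (PySem.Dict.mk label_dict).getD name []
       else (PySem.Dict.mk external_label_dict).getD name [])
        = pvGetLabel label_dict external_label_dict name :=
    lab_eq label_dict external_label_dict
  simp only [hlab]
  rw [init_dict_eq, outerFold_pvMkM (pvGetLabel label_dict external_label_dict) image_list,
    alt_dict_eq]
  set v : Int → List String := fun i =>
    image_list.filter (fun n =>
      decide (PySem.List.pyGet? (pvGetLabel label_dict external_label_dict n) i = some 1)) with hv
  have hd : pvMkM (PySem.List.pyRange 0 28 1) (fun i => [] ++ v i)
      = pvMkM (PySem.List.pyRange 0 28 1) v :=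
    pvMkM_congr (fun i _ => by simp)
  rw [hd]
  refine Prod.ext rfl ?_
  rw [keys_pvMkM, values_pvMkM]
  have hcong : (PySem.List.pyRange 0 28 1).foldl
      (fun c item => c + (((pvMkM (PySem.List.pyRange 0 28 1) v).getD item []).length : Int)) 0
      = (PySem.List.pyRange 0 28 1).foldl (fun c item => c + ((v item).length : Int)) 0 := by
    refine PySem.List.foldl_congr_mem _ _ _ _ (fun c item hmem => ?_)
    rw [getD_pvMkM _ _ _ _ hmem]
  rw [hcong, PySem.List.foldl_add]
  simp [List.map_map, Function.comp_def]
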